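-- pv_equiv track=rewrite | github.com/Thesis-Writing/ABSentilyzer | ensemble_analyzer/apps/public/classifier/scripts/final_aspect_polarity.py | get_sentence_polarity
-- ===== SOURCE A (Python) =====
-- def get_sentence_polarity(senti_score_list):
--   '''
--     This function gets the final aspect polarity list then returns the
--     final polarity of the sentence
--
--     Data Structures
--       ---------------
--       Input:
--         - final_aspect_polarity_list : LIST
--       Returns:
--         - final_polarity_list  : LIST
--   '''
--
--   final_polarity_list = []
--   sentence_polarity = 'neu'
--
--   for i in range(len(senti_score_list)):
--     pos_score = senti_score_list[i][0]
--     neg_score = senti_score_list[i][1]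
--     neu_score = senti_score_list[i][2]
--
--     if pos_score > neg_score and pos_score > neu_score:
--       sentence_polarity = 'pos'
--     elif neg_score > pos_score and neg_score > neu_score:
--       sentence_polarity = 'neg'
--     elif neu_score > pos_score and neu_score > neg_score:
--       sentence_polarity = 'neu'
--
--     final_polarity_list.append(sentence_polarity)
--
--   return final_polarity_list
-- ===== SOURCE B (Python) =====
-- def get_sentence_polarity(senti_score_list):
--   n = len(senti_score_list)
--   # pass 1: sparse list of "decisive" positions (unique strict maximum) with their label
--   marks = []
--   for i, (pos, neg, neu) in enumerate(senti_score_list):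
--     if pos > neg and pos > neu:
--       marks.append((i, 'pos'))
--     elif neg > pos and neg > neu:
--       marks.append((i, 'neg'))
--     elif neu > pos and neu > neg:
--       marks.append((i, 'neu'))
--   # pass 2: expand the sparse marks into runs by replication
--   out = []
--   prev_i, prev_l = 0, 'neu'
--   for i, l in marks:
--     out += [prev_l] * (i - prev_i)
--     prev_i, prev_l = i, l
--   out += [prev_l] * (n - prev_i)
--   return out
-- ===== Notes on version B (the rewrite author's own statement) =====
-- stated objective: alternative
-- what changed: Replaces A's per-element stateful carry loop by two staged passes: first collect a sparse list of decisive positions (index,label), then build the output by run-length replication of each label over the gap to the next decisive position.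
import Mathlib
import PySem

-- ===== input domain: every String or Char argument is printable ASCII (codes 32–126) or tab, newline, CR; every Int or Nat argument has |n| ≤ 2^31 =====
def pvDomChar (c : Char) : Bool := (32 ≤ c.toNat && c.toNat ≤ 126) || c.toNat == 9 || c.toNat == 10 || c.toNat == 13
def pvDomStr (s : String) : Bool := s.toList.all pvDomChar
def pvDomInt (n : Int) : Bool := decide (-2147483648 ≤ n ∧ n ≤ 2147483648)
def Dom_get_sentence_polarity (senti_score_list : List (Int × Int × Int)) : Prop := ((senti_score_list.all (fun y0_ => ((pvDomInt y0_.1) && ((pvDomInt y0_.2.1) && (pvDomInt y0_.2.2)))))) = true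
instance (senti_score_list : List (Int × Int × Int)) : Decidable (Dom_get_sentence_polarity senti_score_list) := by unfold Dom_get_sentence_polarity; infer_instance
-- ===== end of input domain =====

-- B replaces A's per-element stateful carry loop by two staged passes: collect sparse
-- decisive (index,label) marks, then expand them by run-length replication (objective: alternative).

-- ===== PORT A =====
-- A's loop: walks the list in order, updating sentence_polarity per the three strict
-- comparisons (keeping it on any tie), appending the current value each step.
def gspA_loop : List (Int × Int × Int) → String → List String
  | [], _ => []
  | (pos_score, neg_score, neu_score) :: rest, sentence_polarity =>
    let sp' :=
      if pos_score > neg_score ∧ pos_score > neu_score then "pos"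
      else if neg_score > pos_score ∧ neg_score > neu_score then "neg"
      else if neu_score > pos_score ∧ neu_score > neg_score then "neu"
      else sentence_polarity
    sp' :: gspA_loop rest sp'

def get_sentence_polarity (senti_score_list : List (Int × Int × Int)) : List String :=
  gspA_loop senti_score_list "neu"

-- ===== PORT B =====
-- pass 1: sparse list of decisive positions (unique strict maximum) with their label
def gspB_marks : Nat → List (Int × Int × Int) → List (Nat × String)
  | _, [] => []
  | i, (pos, neg, neu) :: rest =>
    if pos > neg ∧ pos > neu then (i, "pos") :: gspB_marks (i + 1) rest
    else if neg > pos ∧ neg > neu then (i, "neg") :: gspB_marks (i + 1) rest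
    else if neu > pos ∧ neu > neg then (i, "neu") :: gspB_marks (i + 1) rest
    else gspB_marks (i + 1) rest

-- pass 2: expand the sparse marks into runs by replication
def gspB_expand (n : Nat) : Nat → String → List (Nat × String) → List String
  | prev_i, prev_l, [] => List.replicate (n - prev_i) prev_l
  | prev_i, prev_l, (i, l) :: rest => List.replicate (i - prev_i) prev_l ++ gspB_expand n i l rest

def get_sentence_polarity_alt (senti_score_list : List (Int × Int × Int)) : List String :=
  gspB_expand senti_score_list.length 0 "neu" (gspB_marks 0 senti_score_list)

-- ===== PRECONDITION & SPEC =====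
def Spec_get_sentence_polarity (senti_score_list : List (Int × Int × Int)) (out : List String) : Prop := out = get_sentence_polarity_alt senti_score_list
instance (senti_score_list : List (Int × Int × Int)) (out : List String) : Decidable (Spec_get_sentence_polarity senti_score_list out) := by unfold Spec_get_sentence_polarity; infer_instance

-- ===== CLAIM (what is proved, stated in full; the proofs are below) =====
def Claim_equal_get_sentence_polarity : Prop := ∀ (senti_score_list : List (Int × Int × Int)), Dom_get_sentence_polarity senti_score_list → Spec_get_sentence_polarity senti_score_list (get_sentence_polarity senti_score_list)

-- ===== LEMMAS AND PROOFS =====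
-- every mark index produced from offset k is ≥ k
theorem gspB_marks_ge (xs : List (Int × Int × Int)) (k : Nat) :
    ∀ p ∈ gspB_marks k xs, k ≤ p.1 := by
  induction xs generalizing k with
  | nil => intro p hp; simp [gspB_marks] at hp
  | cons hd tl ih =>
    obtain ⟨a, b, c⟩ := hd
    intro p hp
    simp only [gspB_marks] at hp
    split_ifs at hp with h1 h2 h3 <;>
      first
        | (rcases List.mem_cons.1 hp with h | h
           · simp [h]
           · exact Nat.le_of_succ_le (ih (k + 1) p h))
        | exact Nat.le_of_succ_le (ih (k + 1) p hp)

-- peeling one cell off an expansion whose marks all lie strictly beyond k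
theorem gspB_expand_step (n k : Nat) (cur : String) (ms : List (Nat × String))
    (hk : k < n) (hms : ∀ p ∈ ms, k < p.1) :
    gspB_expand n k cur ms = cur :: gspB_expand n (k + 1) cur ms := by
  cases ms with
  | nil =>
    simp only [gspB_expand]
    have : n - k = (n - (k + 1)) + 1 := by omega
    rw [this, List.replicate_succ]
  | cons p rest =>
    obtain ⟨i, l⟩ := p
    have hki : k < i := hms (i, l) (List.mem_cons_self ..)
    simp only [gspB_expand]
    have : i - k = (i - (k + 1)) + 1 := by omega
    rw [this, List.replicate_succ, List.cons_append]

theorem gspA_eq_expand (xs : List (Int × Int × Int)) (k : Nat) (cur : String) :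
    gspA_loop xs cur = gspB_expand (k + xs.length) k cur (gspB_marks k xs) := by
  induction xs generalizing k cur with
  | nil => simp [gspA_loop, gspB_marks, gspB_expand]
  | cons hd tl ih =>
    obtain ⟨a, b, c⟩ := hd
    have hms : ∀ p ∈ gspB_marks (k + 1) tl, k < p.1 := fun p hp => gspB_marks_ge tl (k + 1) p hp
    have hk : k < k + (tl.length + 1) := by omega
    simp only [gspA_loop, gspB_marks, List.length_cons]
    rw [show k + (tl.length + 1) = (k + 1) + tl.length by omega]
    split_ifs with h1 h2 h3
    · simp only [gspB_expand, Nat.sub_self, List.replicate_zero, List.nil_append]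
      rw [gspB_expand_step ((k + 1) + tl.length) k _ _ (by omega) hms, ih]
    · simp only [gspB_expand, Nat.sub_self, List.replicate_zero, List.nil_append]
      rw [gspB_expand_step ((k + 1) + tl.length) k _ _ (by omega) hms, ih]
    · simp only [gspB_expand, Nat.sub_self, List.replicate_zero, List.nil_append]
      rw [gspB_expand_step ((k + 1) + tl.length) k _ _ (by omega) hms, ih]
    · rw [gspB_expand_step ((k + 1) + tl.length) k _ _ (by omega) hms, ih]

-- ===== VERDICT (by name: the statement is the Claim_ definition above) =====
theorem get_sentence_polarity_spec : Claim_equal_get_sentence_polarity := by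
  intro xs _
  unfold Spec_get_sentence_polarity get_sentence_polarity get_sentence_polarity_alt
  simpa using gspA_eq_expand xs 0 "neu"
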